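-- pv_equiv track=rewrite | github.com/Hk4Fun/algorithm_offer | 44_扑克牌的顺子.py | IsContinuous2
-- ===== SOURCE A (Python) =====
-- def IsContinuous2(numbers):
--     if not numbers or len(numbers) != 5:
--         return False
--     length = len(numbers)
--
--     # 统计大小王的个数，并检查每个数是否有效（>=0and<=13）
--     zero_num = 0
--     for i in numbers:
--         if i == 0:
--             zero_num += 1
--         elif i < 0 or i > 13:
--             return False
--     numbers.sort()
--     # 统计相邻数字的空缺个数
--     start = zero_num
--     next = start + 1
--     gap_num = 0
--     while next < length:
--         # 如果出现对子的情况，一定不可能成为顺子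
--         if numbers[next] == numbers[start]:
--             return False
--         gap_num += numbers[next] - numbers[start] - 1
--         start = next
--         next += 1
--     # 判断能够成为顺子
--     if gap_num <= zero_num:
--         return True
--     return False
-- ===== SOURCE B (Python) =====
-- def IsContinuous2(numbers):
--     if not numbers or len(numbers) != 5:
--         return False
--     zero_num = 0
--     for i in numbers:
--         if i == 0:
--             zero_num += 1
--         elif i < 0 or i > 13:
--             return False
--     numbers.sort()
--     rest = numbers[zero_num:]
--     if not rest:
--         return True
--     if len(set(rest)) != len(rest):
--         return False
--     return rest[-1] - rest[0] <= 4
-- ===== Notes on version B (the rewrite author's own statement) =====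
-- stated objective: simpler
-- what changed: Replaces A's index-walking gap-summing while loop with a closed-form check on the sorted non-joker slice: a set-based duplicate test plus span(max-min) <= 4.
import Mathlib
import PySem

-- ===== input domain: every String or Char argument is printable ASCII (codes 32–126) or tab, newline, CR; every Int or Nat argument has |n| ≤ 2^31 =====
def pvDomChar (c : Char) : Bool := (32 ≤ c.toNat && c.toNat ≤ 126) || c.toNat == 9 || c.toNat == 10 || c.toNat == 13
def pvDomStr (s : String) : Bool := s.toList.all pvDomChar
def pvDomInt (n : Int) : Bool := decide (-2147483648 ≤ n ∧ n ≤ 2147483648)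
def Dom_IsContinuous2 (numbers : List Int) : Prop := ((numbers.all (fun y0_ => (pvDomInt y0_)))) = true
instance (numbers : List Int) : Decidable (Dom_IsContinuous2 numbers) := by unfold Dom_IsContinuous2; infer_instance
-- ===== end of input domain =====

-- B replaces A's gap-summing while loop with a span + set-duplicate check on the sorted
-- non-joker slice (simpler). Both Pythons sort `numbers` in place identically; the
-- theorems are about the return value.

-- ===== PORT A =====
-- A's validation for-loop: counts jokers, none = early `return False` on an invalid card
def pvCountZerosA? (l : List Int) (acc : Int) : Option Int :=
  match l with
  | [] => some acc
  | i :: t =>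
    if i = 0 then pvCountZerosA? t (acc + 1)
    else if i < 0 ∨ i > 13 then none
    else pvCountZerosA? t acc

-- A's while loop over indices; none = `return False` on a pair
def pvGapLoop (s : List Int) (length : Int) (start next gap : Int) : Option Int :=
  if h : next < length then
    if PySem.List.pyGetD s next 0 = PySem.List.pyGetD s start 0 then none
    else pvGapLoop s length next (next + 1)
          (gap + (PySem.List.pyGetD s next 0 - PySem.List.pyGetD s start 0 - 1))
  else some gap
termination_by (length - next).toNat
decreasing_by omega

def IsContinuous2 (numbers : List Int) : Bool :=
  if numbers = [] ∨ numbers.length ≠ 5 then false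
  else
    let length : Int := numbers.length
    match pvCountZerosA? numbers 0 with
    | none => false
    | some zero_num =>
      let s := PySem.List.sorted numbers (fun x => x) false
      match pvGapLoop s length zero_num (zero_num + 1) 0 with
      | none => false
      | some gap_num => if gap_num ≤ zero_num then true else false

-- ===== PORT B =====
-- B's validation loop (same guards as A's, by design)
def pvCountZerosB? (l : List Int) (acc : Int) : Option Int :=
  match l with
  | [] => some acc
  | i :: t =>
    if i = 0 then pvCountZerosB? t (acc + 1)
    else if i < 0 ∨ i > 13 then none
    else pvCountZerosB? t acc

def IsContinuous2_alt (numbers : List Int) : Bool :=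
  if numbers = [] ∨ numbers.length ≠ 5 then false
  else
    match pvCountZerosB? numbers 0 with
    | none => false
    | some zero_num =>
      let s := PySem.List.sorted numbers (fun x => x) false
      let rest := PySem.List.slice s (some zero_num) none
      if rest = [] then true
      else if (PySem.Set.ofList rest).length ≠ rest.length then false
      else decide (PySem.List.pyGetD rest (-1) 0 - PySem.List.pyGetD rest 0 0 ≤ 4)

-- ===== PRECONDITION & SPEC =====
def Spec_IsContinuous2 (numbers : List Int) (out : Bool) : Prop := out = IsContinuous2_alt numbers
instance (numbers : List Int) (out : Bool) : Decidable (Spec_IsContinuous2 numbers out) := by unfold Spec_IsContinuous2; infer_instance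

-- ===== CLAIM (what is proved, stated in full; the proofs are below) =====
def Claim_equal_IsContinuous2 : Prop := ∀ (numbers : List Int), Dom_IsContinuous2 numbers → Spec_IsContinuous2 numbers (IsContinuous2 numbers)

-- ===== LEMMAS AND PROOFS =====
theorem countB_eq_countA (l : List Int) (acc : Int) :
    pvCountZerosB? l acc = pvCountZerosA? l acc := by
  induction l generalizing acc with
  | nil => rfl
  | cons i t ih => simp only [pvCountZerosA?, pvCountZerosB?]; split_ifs <;> simp [ih]

theorem countA_bounds (l : List Int) (acc z : Int)
    (h : pvCountZerosA? l acc = some z) : acc ≤ z ∧ z ≤ acc + l.length := by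
  induction l generalizing acc with
  | nil => simp [pvCountZerosA?] at h; omega
  | cons i t ih =>
    simp only [pvCountZerosA?] at h
    split_ifs at h
    · have := ih _ h; simp; omega
    · have := ih _ h; simp; omega

-- ===== VERDICT (by name: the statement is the Claim_ definition above) =====
theorem IsContinuous2_spec : Claim_equal_IsContinuous2 := by
  intro numbers _
  unfold Spec_IsContinuous2 IsContinuous2 IsContinuous2_alt
  split_ifs with hguard
  · rfl
  push Not at hguard
  obtain ⟨hne, hlen⟩ := hguard
  rw [countB_eq_countA]
  cases hc : pvCountZerosA? numbers 0 with
  | none => rfl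
  | some z =>
    simp only []
    obtain ⟨hz0, hz5⟩ := countA_bounds numbers 0 z hc
    rw [hlen] at hz5; simp at hz5
    -- destructure the sorted list
    have hslen : (PySem.List.sorted numbers (fun x => x) false).length = 5 := by
      rw [PySem.List.length_sorted, hlen]
    have hpw := PySem.List.sorted_pairwise numbers (fun x => x)
    obtain ⟨a, b, c, d, e, hs⟩ :
        ∃ a b c d e, PySem.List.sorted numbers (fun x => x) false = [a, b, c, d, e] := by
      match hl : PySem.List.sorted numbers (fun x => x) false with
      | [a, b, c, d, e] => exact ⟨a, b, c, d, e, rfl⟩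
      | [] | [_] | [_,_] | [_,_,_] | [_,_,_,_] => simp [hl] at hslen
      | _::_::_::_::_::_::_ => simp [hl] at hslen
    rw [hs] at hpw
    simp [List.pairwise_cons] at hpw
    obtain ⟨⟨hab, hac, had, hae⟩, ⟨hbc, hbd, hbe⟩, ⟨hcd, hce⟩, hde⟩ := hpw
    rw [hs, hlen]
    interval_cases z <;>
      simp [pvGapLoop, PySem.List.slice_from, PySem.Set.ofList, PySem.Set.add,
            PySem.List.pyGetD, PySem.List.pyGet?, PySem.List.pyIdx?] <;>
      split_ifs <;> simp_all <;> omega
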